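-- pv_equiv track=rewrite | github.com/brunolourencosilva/Python | testes/criador_formulas.py | gerar_formulas
-- ===== SOURCE A (Python) =====
-- import itertools
--
-- def gerar_formulas(elementos, max_combinacoes=3):
--     formulas = set()
--     for r in range(1, max_combinacoes + 1):
--         for combinacao in itertools.combinations_with_replacement(elementos, r):
--             # Contar a quantidade de cada elemento na combinação
--             formula = {}
--             for elemento in combinacao:
--                 if elemento in formula:
--                     formula[elemento] += 1
--                 else:
--                     formula[elemento] = 1
--
--             # Criar a fórmula química a partir da contagem de elementos
--             formula_str = ''.join(f'{e}{formula[e] if formula[e] > 1 else ""}' for e in sorted(formula))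
--             formulas.add(formula_str)
--
--     return formulas
-- ===== SOURCE B (Python) =====
-- def gerar_formulas(elementos, max_combinacoes=3):
--     # Breadth-first worklist over the deduplicated element list: each level keeps
--     # (remaining-suffix, running counts) states and extends them, so combinations are
--     # never re-enumerated or re-counted per size; no itertools.
--     vistos = list(dict.fromkeys(elementos))
--     formulas = set()
--     nivel = [(vistos, {})]
--     for _ in range(max_combinacoes):
--         prox = []
--         for resto, cont in nivel:
--             resto2 = resto
--             while resto2:
--                 c2 = dict(cont)
--                 c2[resto2[0]] = c2.get(resto2[0], 0) + 1
--                 prox.append((resto2, c2))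
--                 resto2 = resto2[1:]
--         nivel = prox
--         for resto, cont in nivel:
--             formulas.add(''.join(f'{e}{cont[e] if cont[e] > 1 else ""}' for e in sorted(cont)))
--     return formulas
-- ===== Notes on version B (the rewrite author's own statement) =====
-- stated objective: alternative
-- what changed: B replaces the per-size itertools.combinations_with_replacement enumeration with a breadth-first worklist over the deduplicated element list: each level holds (remaining-suffix, running-count-dict) states that are extended by one element at a time, so combinations are never materialized as tuples nor re-counted from scratch, and duplicate input elements do not multiply the states visited.
import Mathlib
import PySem

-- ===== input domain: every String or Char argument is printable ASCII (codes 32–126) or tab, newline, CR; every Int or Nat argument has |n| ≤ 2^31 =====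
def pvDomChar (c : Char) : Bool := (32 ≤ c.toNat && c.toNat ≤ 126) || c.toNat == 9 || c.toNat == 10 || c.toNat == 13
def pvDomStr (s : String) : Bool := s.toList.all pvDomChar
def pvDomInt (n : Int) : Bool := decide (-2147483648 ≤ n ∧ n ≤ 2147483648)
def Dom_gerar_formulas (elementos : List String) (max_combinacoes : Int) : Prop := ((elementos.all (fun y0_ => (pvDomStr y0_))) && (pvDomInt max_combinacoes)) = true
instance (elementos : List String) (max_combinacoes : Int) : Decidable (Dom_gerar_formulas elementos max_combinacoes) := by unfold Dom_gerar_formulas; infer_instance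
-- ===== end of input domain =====

-- B replaces the per-size combinations_with_replacement enumeration with a breadth-first
-- worklist of (remaining-suffix, running-count-dict) states over the deduplicated element
-- list, extending states one element at a time; objective: alternative.

-- ===== PORT A =====
-- itertools.combinations_with_replacement(l, r), tuples as lists, in CPython's
-- index-lexicographic order.
def pvCwr {α : Type} (l : List α) (r : Nat) : List (List α) :=
  match r, l with
  | 0, _ => [[]]
  | _ + 1, [] => []
  | r + 1, x :: xs => ((pvCwr (x :: xs) r).map (fun c => x :: c)) ++ pvCwr xs (r + 1)
termination_by (r, l.length)

def gerar_formulas (elementos : List String) (max_combinacoes : Int) : List String :=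
  (PySem.List.pyRange 1 (max_combinacoes + 1)).foldl (fun formulas r =>
    -- every r produced by range(1, max_combinacoes + 1) satisfies 1 ≤ r, so r.toNat is exact
    (pvCwr elementos r.toNat).foldl (fun formulas combinacao =>
      let formula : PySem.Dict String Int := combinacao.foldl (fun formula elemento =>
        if formula.contains elemento then
          formula.insert elemento (formula.getD elemento 0 + 1)
        else
          formula.insert elemento 1) PySem.Dict.empty
      let formula_str := PySem.Str.join "" ((PySem.List.sorted formula.keys (fun e => e)).map
        (fun e => e ++ (if formula.getD e 0 > 1 then PySem.Int.toStr (formula.getD e 0) else "")))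
      PySem.Set.add formulas formula_str) formulas) PySem.Set.empty

-- ===== PORT B =====
-- the inner 'while resto2:' loop of Source B: one child state per nonempty suffix of resto,
-- appended to prox in order (dict copy is implicit: PySem.Dict is immutable)
def pvWhileExt (cont : PySem.Dict String Int)
    (prox : List (List String × PySem.Dict String Int)) :
    List String → List (List String × PySem.Dict String Int)
  | [] => prox
  | e :: rest =>
      pvWhileExt cont (prox ++ [(e :: rest, cont.insert e (cont.getD e 0 + 1))]) rest

def gerar_formulas_alt (elementos : List String) (max_combinacoes : Int) : List String :=
  let vistos := PySem.List.dedup elementos    -- list(dict.fromkeys(elementos))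
  ((PySem.List.pyRange 0 max_combinacoes).foldl
    (fun (st : PySem.Set String × List (List String × PySem.Dict String Int)) _ =>
      let prox := st.2.foldl (fun prox p => pvWhileExt p.2 prox p.1) []
      let nivel := prox
      let formulas := nivel.foldl (fun formulas p =>
        PySem.Set.add formulas (PySem.Str.join "" ((PySem.List.sorted p.2.keys (fun e => e)).map
          (fun e => e ++ (if p.2.getD e 0 > 1 then PySem.Int.toStr (p.2.getD e 0) else ""))))) st.1
      (formulas, nivel))
    ((PySem.Set.empty : PySem.Set String), [(vistos, (PySem.Dict.empty : PySem.Dict String Int))])).1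

-- ===== PRECONDITION & SPEC =====
def Spec_gerar_formulas (elementos : List String) (max_combinacoes : Int) (out : List String) : Prop := out = gerar_formulas_alt elementos max_combinacoes
instance (elementos : List String) (max_combinacoes : Int) (out : List String) : Decidable (Spec_gerar_formulas elementos max_combinacoes out) := by unfold Spec_gerar_formulas; infer_instance

-- ===== CLAIM (what is proved, stated in full; the proofs are below) =====
def Claim_equal_gerar_formulas : Prop := ∀ (elementos : List String) (max_combinacoes : Int), Dom_gerar_formulas elementos max_combinacoes → Spec_gerar_formulas elementos max_combinacoes (gerar_formulas elementos max_combinacoes)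

-- ===== LEMMAS AND PROOFS =====

-- the formatter both programs apply to a count dict (syntactically the ports' join expression)
def pvFmtD (d : PySem.Dict String Int) : String :=
  PySem.Str.join "" ((PySem.List.sorted d.keys (fun e => e)).map
    (fun e => e ++ (if d.getD e 0 > 1 then PySem.Int.toStr (d.getD e 0) else "")))

-- proof-side formatter over a combination list
def pvFmtB (c : List String) : String :=
  PySem.Str.join "" ((PySem.List.sorted (PySem.Set.ofList c) (fun e => e)).map
    (fun e => e ++ (if ((c.count e : Int) > 1) then PySem.Int.toStr ((c.count e : Int)) else "")))

-- the multiset of a combination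
def pvMs (c : List String) : Multiset String := (c : Multiset String)

def pvPhi (m : Multiset String) : String := pvFmtB (m.sort (· ≤ ·))

lemma pvCwr_zero {α : Type} (L : List α) : pvCwr L 0 = [[]] := by
  unfold pvCwr; rfl

lemma pvCwr_nil {α : Type} (r : Nat) : pvCwr ([] : List α) (r + 1) = [] := by
  unfold pvCwr; rfl

lemma pvCwr_cons {α : Type} (x : α) (xs : List α) (r : Nat) :
    pvCwr (x :: xs) (r + 1)
      = ((pvCwr (x :: xs) r).map (fun c => x :: c)) ++ pvCwr xs (r + 1) := by
  rw [pvCwr]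

lemma pvCwr_len : ∀ (r : Nat) (L : List String), ∀ c ∈ pvCwr L r, c.length = r := by
  intro r
  induction r with
  | zero => intro L c hc; rw [pvCwr_zero] at hc; simp_all
  | succ r ihr =>
    intro L
    induction L with
    | nil => intro c hc; rw [pvCwr_nil] at hc; simp at hc
    | cons x xs ihL =>
      intro c hc
      rw [pvCwr_cons] at hc
      rcases List.mem_append.mp hc with h | h
      · obtain ⟨c0, hc0, rfl⟩ := List.mem_map.mp h
        simp [ihr _ _ hc0]
      · exact ihL c h

lemma pvCwr_support : ∀ (r : Nat) (L : List String), ∀ c ∈ pvCwr L r, ∀ a ∈ c, a ∈ L := by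
  intro r
  induction r with
  | zero => intro L c hc; rw [pvCwr_zero] at hc; simp_all
  | succ r ihr =>
    intro L
    induction L with
    | nil => intro c hc; rw [pvCwr_nil] at hc; simp at hc
    | cons x xs ihL =>
      intro c hc a ha
      rw [pvCwr_cons] at hc
      rcases List.mem_append.mp hc with h | h
      · obtain ⟨c0, hc0, rfl⟩ := List.mem_map.mp h
        rcases List.mem_cons.mp ha with rfl | ha'
        · exact List.mem_cons_self
        · exact ihr _ _ hc0 a ha'
      · exact List.mem_cons_of_mem x (ihL c h a ha)

lemma pvCwr_complete : ∀ (r : Nat) (L : List String) (m : Multiset String),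
    Multiset.card m = r → (∀ a ∈ m, a ∈ L) → m ∈ (pvCwr L r).map pvMs := by
  intro r
  induction r with
  | zero =>
    intro L m hcard _
    rw [Multiset.card_eq_zero.mp hcard, pvCwr_zero]
    simp [pvMs]
  | succ r ihr =>
    intro L
    induction L with
    | nil =>
      intro m hcard hsub
      obtain ⟨a, ha⟩ := Multiset.card_pos_iff_exists_mem.mp (by rw [hcard]; omega)
      exact absurd (hsub a ha) (List.not_mem_nil)
    | cons x xs ihL =>
      intro m hcard hsub
      by_cases hx : x ∈ m
      · have h1 : Multiset.card (m.erase x) = r := by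
          rw [Multiset.card_erase_of_mem hx, hcard]; rfl
        have h2 : ∀ a ∈ m.erase x, a ∈ x :: xs :=
          fun a ha => hsub a (Multiset.mem_of_mem_erase ha)
        obtain ⟨c0, hc0, hms⟩ := List.mem_map.mp (ihr (x :: xs) (m.erase x) h1 h2)
        refine List.mem_map.mpr ⟨x :: c0, ?_, ?_⟩
        · rw [pvCwr_cons]
          exact List.mem_append_left _ (List.mem_map.mpr ⟨c0, hc0, rfl⟩)
        · show pvMs (x :: c0) = m
          unfold pvMs at *
          rw [← Multiset.cons_coe, hms, Multiset.cons_erase hx]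
      · have h2 : ∀ a ∈ m, a ∈ xs := by
          intro a ha
          rcases List.mem_cons.mp (hsub a ha) with rfl | h
          · exact absurd ha hx
          · exact h
        have hmem := ihL m hcard h2
        rw [pvCwr_cons, List.map_append]
        exact List.mem_append_right _ hmem

lemma pvCwr_filter (x : String) : ∀ (r : Nat) (L : List String),
    (pvCwr L r).filter (fun c => !(c.contains x)) = pvCwr (L.filter (fun a => !(a == x))) r := by
  intro r
  induction r with
  | zero => intro L; rw [pvCwr_zero, pvCwr_zero]; rfl
  | succ r ihr =>
    intro L
    induction L with
    | nil => rw [pvCwr_nil]; simp [pvCwr_nil]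
    | cons y ys ihL =>
      rw [pvCwr_cons, List.filter_append]
      by_cases hyx : y = x
      · subst hyx
        have hkill : ((pvCwr (y :: ys) r).map (fun c => y :: c)).filter (fun c => !(c.contains y)) = [] := by
          apply List.filter_eq_nil_iff.mpr
          intro c hc
          obtain ⟨c0, _, rfl⟩ := List.mem_map.mp hc
          simp
        rw [hkill, List.nil_append, ihL]
        have : (y :: ys).filter (fun a => !(a == y)) = ys.filter (fun a => !(a == y)) := by simp
        rw [this]
      · have hbeq : (y == x) = false := by simp [hyx]
        have hrhs : (y :: ys).filter (fun a => !(a == x)) = y :: ys.filter (fun a => !(a == x)) := by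
          simp [hbeq]
        rw [hrhs, pvCwr_cons]
        have hcomp : ((fun c : List String => !(c.contains x)) ∘ fun c => y :: c)
            = (fun c : List String => !(c.contains x)) := by
          funext c
          simp [Ne.symm hyx]
        rw [List.filter_map, hcomp, ihr (y :: ys), ihL]
        have : (y :: ys).filter (fun a => !(a == x)) = y :: ys.filter (fun a => !(a == x)) := by
          simp [hbeq]
        rw [this]

lemma pvOfList_map_inj {α β : Type} [BEq α] [LawfulBEq α] [BEq β] [LawfulBEq β]
    (f : α → β) (hf : Function.Injective f) (l : List α) :
    PySem.Set.ofList (l.map f) = (PySem.Set.ofList l).map f := by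
  induction l using List.reverseRecOn with
  | nil => rfl
  | append_singleton l a ih =>
    rw [List.map_append, List.map_singleton, PySem.Set.ofList_append_singleton,
      PySem.Set.ofList_append_singleton, ih, PySem.Set.add_eq_ite, PySem.Set.add_eq_ite]
    by_cases h : a ∈ PySem.Set.ofList l
    · rw [if_pos h, if_pos (List.mem_map.mpr ⟨a, h, rfl⟩)]
    · have hf : f a ∉ (PySem.Set.ofList l).map f := by
        intro hmem
        obtain ⟨b, hb, hfb⟩ := List.mem_map.mp hmem
        exact h (hf hfb ▸ hb)
      rw [if_neg h, if_neg hf, List.map_append, List.map_singleton]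

lemma pvOfList_map_ofList {α β : Type} [BEq α] [LawfulBEq α] [BEq β] [LawfulBEq β]
    (f : α → β) (l : List α) :
    PySem.Set.ofList (l.map f) = PySem.Set.ofList ((PySem.Set.ofList l).map f) := by
  induction l using List.reverseRecOn with
  | nil => rfl
  | append_singleton l a ih =>
    rw [List.map_append, List.map_singleton, PySem.Set.ofList_append_singleton, ih,
      PySem.Set.ofList_append_singleton, PySem.Set.add_eq_ite (s := PySem.Set.ofList l)]
    by_cases h : a ∈ PySem.Set.ofList l
    · rw [if_pos h, PySem.Set.add_of_mem]
      rw [PySem.Set.mem_ofList]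
      exact List.mem_map.mpr ⟨a, h, rfl⟩
    · rw [if_neg h, List.map_append, List.map_singleton, PySem.Set.ofList_append_singleton]

-- the core of the A-side rewrite: deduplicating the element list first does not change the
-- (first-occurrence deduplicated) stream of combination multisets
lemma pvT : ∀ (r : Nat) (L : List String),
    PySem.Set.ofList ((pvCwr L r).map pvMs) = (pvCwr (PySem.List.dedup L) r).map pvMs := by
  intro r
  induction r with
  | zero => intro L; rw [pvCwr_zero, pvCwr_zero]; rfl
  | succ r ihr =>
    intro L
    induction L with
    | nil =>
      rw [pvCwr_nil]
      show PySem.Set.ofList [] = _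
      rw [show PySem.List.dedup ([] : List String) = [] from rfl, pvCwr_nil]
      rfl
    | cons x xs ihL =>
      have hdd : PySem.List.dedup (x :: xs) = x :: (PySem.Set.ofList xs).discard x := by
        simp [PySem.List.dedup, PySem.Set.ofList_cons]
      have hmapms : ∀ (l : List (List String)) (z : String),
          (l.map (fun c => z :: c)).map pvMs = (l.map pvMs).map (fun m => z ::ₘ m) := by
        intro l z
        rw [List.map_map, List.map_map]
        apply List.map_congr_left
        intro c _
        simp [pvMs, Multiset.cons_coe]
      have hinj : Function.Injective (fun m : Multiset String => x ::ₘ m) :=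
        fun s t h => (Multiset.cons_inj_right x).mp h
      rw [hdd, pvCwr_cons, pvCwr_cons, List.map_append, List.map_append,
        PySem.Set.ofList_append, PySem.Set.update_eq_append_filter,
        hmapms _ x, hmapms _ x, pvOfList_map_inj _ hinj, ihr (x :: xs), hdd]
      congr 1
      rw [ihL]
      have hcf : ∀ m ∈ (pvCwr (PySem.List.dedup xs) (r + 1)).map pvMs,
          (!(PySem.Set.contains
              (((pvCwr (x :: (PySem.Set.ofList xs).discard x) r).map pvMs).map (fun m => x ::ₘ m)) m))
            = (!(decide (x ∈ m))) := by
        intro m hm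
        congr 1
        obtain ⟨c, hc, rfl⟩ := List.mem_map.mp hm
        by_cases hxm : x ∈ pvMs c
        · have hcard : Multiset.card (pvMs c) = r + 1 := by
            simp [pvMs, pvCwr_len _ _ _ hc]
          have hsub : ∀ a ∈ (pvMs c).erase x, a ∈ x :: (PySem.Set.ofList xs).discard x := by
            intro a ha
            have ham : a ∈ pvMs c := Multiset.mem_of_mem_erase ha
            have haxs : a ∈ PySem.Set.ofList xs := by
              have := pvCwr_support _ _ _ hc a (Multiset.mem_coe.mp ham)
              simpa [PySem.List.dedup] using this
            by_cases hax : a = x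
            · exact hax ▸ List.mem_cons_self
            · refine List.mem_cons_of_mem _ ?_
              show a ∈ List.filter (fun y => !(y == x)) (PySem.Set.ofList xs)
              exact List.mem_filter.mpr ⟨haxs, by simp [hax]⟩
          have hcE : Multiset.card ((pvMs c).erase x) = r := by
            rw [Multiset.card_erase_of_mem hxm, hcard]; rfl
          obtain ⟨c0, hc0, hms0⟩ :=
            List.mem_map.mp (pvCwr_complete r (x :: (PySem.Set.ofList xs).discard x) ((pvMs c).erase x) hcE hsub)
          have hmem : pvMs c ∈ ((pvCwr (x :: (PySem.Set.ofList xs).discard x) r).map pvMs).map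
              (fun m => x ::ₘ m) :=
            List.mem_map.mpr ⟨pvMs c0, List.mem_map.mpr ⟨c0, hc0, rfl⟩, by
              show x ::ₘ pvMs c0 = pvMs c
              rw [hms0, Multiset.cons_erase hxm]⟩
          have h1 : PySem.Set.contains (((pvCwr (x :: (PySem.Set.ofList xs).discard x) r).map pvMs).map
              (fun m => x ::ₘ m)) (pvMs c) = true := (PySem.Set.contains_iff _ _).mpr hmem
          rw [h1]
          simp [hxm]
        · have hnot : pvMs c ∉ ((pvCwr (x :: (PySem.Set.ofList xs).discard x) r).map pvMs).map
              (fun m => x ::ₘ m) := by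
            intro hmem
            obtain ⟨m0, _, hm0⟩ := List.mem_map.mp hmem
            exact hxm (hm0 ▸ Multiset.mem_cons_self x m0)
          have h1 : PySem.Set.contains (((pvCwr (x :: (PySem.Set.ofList xs).discard x) r).map pvMs).map
              (fun m => x ::ₘ m)) (pvMs c) = false := by
            rw [← Bool.not_eq_true, PySem.Set.contains_iff]
            exact hnot
          rw [h1]
          simp [hxm]
      rw [List.filter_congr hcf, List.filter_map]
      have hpred : ((fun m : Multiset String => !(decide (x ∈ m))) ∘ pvMs)
          = (fun c : List String => !(c.contains x)) := by
        funext c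
        by_cases h : x ∈ c <;> simp [pvMs, Multiset.mem_coe, h]
      rw [hpred, pvCwr_filter x (r + 1) (PySem.List.dedup xs)]
      have hdisc : (PySem.List.dedup xs).filter (fun a => !(a == x))
          = (PySem.Set.ofList xs).discard x := rfl
      rw [hdisc]

lemma pvFmtB_perm {c c' : List String} (h : c.Perm c') : pvFmtB c = pvFmtB c' := by
  have h1 : (PySem.Set.ofList c).Perm (PySem.Set.ofList c') := by
    refine (List.perm_ext_iff_of_nodup (PySem.Set.nodup_ofList c) (PySem.Set.nodup_ofList c')).mpr ?_
    intro a
    simp [PySem.Set.mem_ofList, h.mem_iff]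
  have hs : PySem.List.sorted (PySem.Set.ofList c) (fun e => e)
      = PySem.List.sorted (PySem.Set.ofList c') (fun e => e) := by
    apply PySem.List.eq_of_perm_of_pairwise_le_of_injective (fun e => e) (fun a b hab => hab)
    · exact (PySem.List.sorted_perm _ _ _).trans (h1.trans (PySem.List.sorted_perm _ _ _).symm)
    · exact PySem.List.sorted_pairwise _ _
    · exact PySem.List.sorted_pairwise _ _
  unfold pvFmtB
  rw [hs]
  congr 1
  apply List.map_congr_left
  intro e _
  rw [h.count_eq]

lemma pvPhi_coe (c : List String) : pvPhi (pvMs c) = pvFmtB c := by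
  unfold pvPhi
  apply pvFmtB_perm
  rw [← Multiset.coe_eq_coe]
  exact Multiset.sort_eq _ _

lemma pvG (n : Nat) (L : List String) :
    PySem.Set.ofList ((pvCwr L n).map pvFmtB)
      = PySem.Set.ofList ((pvCwr (PySem.List.dedup L) n).map pvFmtB) := by
  have h1 : ∀ (l : List (List String)), l.map pvFmtB = (l.map pvMs).map pvPhi := by
    intro l
    rw [List.map_map]
    apply List.map_congr_left
    intro c _
    exact (pvPhi_coe c).symm
  rw [h1, h1, pvOfList_map_ofList pvPhi ((pvCwr L n).map pvMs), pvT n L]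

lemma pvUpdate_congr {s : PySem.Set String} {l₁ l₂ : List String}
    (h : PySem.Set.ofList l₁ = PySem.Set.ofList l₂) : s.update l₁ = s.update l₂ := by
  rw [PySem.Set.update_eq_append_filter, PySem.Set.update_eq_append_filter, h]

-- A's dict-building fold is Counter, and the shared formatter on a Counter is pvFmtB
lemma pvFoldDict_eq_counter (c : List String) :
    c.foldl (fun formula elemento =>
        if formula.contains elemento then
          formula.insert elemento (formula.getD elemento 0 + 1)
        else
          formula.insert elemento 1) (PySem.Dict.empty : PySem.Dict String Int)
      = PySem.Dict.counter c := by
  rw [← PySem.Dict.foldl_insert_getD_add_one_eq_counter]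
  apply PySem.List.foldl_congr_mem
  intro d e _
  by_cases h : d.contains e = true
  · rw [if_pos h]
  · rw [if_neg h, PySem.Dict.getD_of_not_contains d 0 (by simpa using h)]
    norm_num

lemma pvFmtD_counter (c : List String) : pvFmtD (PySem.Dict.counter c) = pvFmtB c := by
  unfold pvFmtD
  rw [PySem.Dict.keys_counter]
  unfold pvFmtB
  congr 1
  apply List.map_congr_left
  intro e _
  rw [PySem.Dict.getD_counter]

-- A's inner fold over the raw element list equals the canonical fold over the dedup list
lemma pvStep (L : List String) (n : Nat) (acc : PySem.Set String) :
    (pvCwr L n).foldl (fun formulas combinacao =>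
      let formula : PySem.Dict String Int := combinacao.foldl (fun formula elemento =>
        if formula.contains elemento then
          formula.insert elemento (formula.getD elemento 0 + 1)
        else
          formula.insert elemento 1) PySem.Dict.empty
      let formula_str := PySem.Str.join "" ((PySem.List.sorted formula.keys (fun e => e)).map
        (fun e => e ++ (if formula.getD e 0 > 1 then PySem.Int.toStr (formula.getD e 0) else "")))
      PySem.Set.add formulas formula_str) acc
    = (pvCwr (PySem.List.dedup L) n).foldl
        (fun formulas c => PySem.Set.add formulas (pvFmtB c)) acc := by
  have hA : ∀ (acc : PySem.Set String), ∀ c ∈ pvCwr L n,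
      (fun formulas combinacao =>
        let formula : PySem.Dict String Int := combinacao.foldl (fun formula elemento =>
          if formula.contains elemento then
            formula.insert elemento (formula.getD elemento 0 + 1)
          else
            formula.insert elemento 1) PySem.Dict.empty
        let formula_str := PySem.Str.join "" ((PySem.List.sorted formula.keys (fun e => e)).map
          (fun e => e ++ (if formula.getD e 0 > 1 then PySem.Int.toStr (formula.getD e 0) else "")))
        PySem.Set.add formulas formula_str) acc c
      = PySem.Set.add acc (pvFmtB c) := by
    intro acc c _
    show PySem.Set.add acc (pvFmtD (c.foldl _ PySem.Dict.empty)) = _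
    rw [pvFoldDict_eq_counter, pvFmtD_counter]
  rw [PySem.List.foldl_congr_mem _ _ (fun formulas c => PySem.Set.add formulas (pvFmtB c)) acc hA,
    ← PySem.Set.update_map_eq_foldl_add, ← PySem.Set.update_map_eq_foldl_add]
  exact pvUpdate_congr (pvG n L)

-- ===== B-side: the BFS levels enumerate exactly pvCwr, in order =====

-- proof-side model of one level step, carrying the chosen combination instead of its counter
def pvExt (c : List String) : List String → List (List String × List String)
  | [] => []
  | e :: rest => (e :: rest, c ++ [e]) :: pvExt c rest

def pvS (L : List String) : Nat → List (List String × List String)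
  | 0 => [(L, [])]
  | n + 1 => (pvS L n).flatMap (fun p => pvExt p.2 p.1)

lemma pvExt_prep (x : String) (c : List String) : ∀ (r : List String),
    pvExt (x :: c) r = (pvExt c r).map (fun q => (q.1, x :: q.2)) := by
  intro r
  induction r with
  | nil => rfl
  | cons e rest ih => simp [pvExt, ih]

lemma pvS_nil : ∀ (n : Nat), pvS ([] : List String) (n + 1) = [] := by
  intro n
  induction n with
  | zero => rfl
  | succ n ih => show (pvS [] (n + 1)).flatMap _ = []; rw [ih]; rfl

lemma pvS_cons (x : String) (xs : List String) : ∀ (n : Nat),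
    pvS (x :: xs) (n + 1)
      = (pvS (x :: xs) n).map (fun p => (p.1, x :: p.2)) ++ pvS xs (n + 1) := by
  intro n
  induction n with
  | zero => rfl
  | succ n ih =>
    calc pvS (x :: xs) (n + 1 + 1)
        = ((pvS (x :: xs) n).map (fun p => (p.1, x :: p.2)) ++ pvS xs (n + 1)).flatMap
            (fun p => pvExt p.2 p.1) := by
          show (pvS (x :: xs) (n + 1)).flatMap (fun p => pvExt p.2 p.1) = _
          rw [ih]
      _ = (pvS (x :: xs) n).flatMap
            (fun p => (pvExt p.2 p.1).map (fun q => (q.1, x :: q.2))) ++ pvS xs (n + 1 + 1) := by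
          rw [List.flatMap_append, List.flatMap_map]
          congr 1
          congr 1
          funext p
          show pvExt (x :: p.2) p.1 = (pvExt p.2 p.1).map (fun q => (q.1, x :: q.2))
          exact pvExt_prep x p.2 p.1
      _ = ((pvS (x :: xs) n).flatMap (fun p => pvExt p.2 p.1)).map
            (fun q => (q.1, x :: q.2)) ++ pvS xs (n + 1 + 1) := by
          rw [List.map_flatMap]
      _ = (pvS (x :: xs) (n + 1)).map (fun p => (p.1, x :: p.2)) ++ pvS xs (n + 1 + 1) := rfl

lemma pvS_snd : ∀ (n : Nat) (L : List String), (pvS L n).map Prod.snd = pvCwr L n := by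
  intro n
  induction n with
  | zero => intro L; rw [pvCwr_zero]; rfl
  | succ n ihr =>
    intro L
    induction L with
    | nil => rw [pvS_nil, pvCwr_nil]; rfl
    | cons x xs ihL =>
      rw [pvS_cons, List.map_append, List.map_map, pvCwr_cons, ← ihr (x :: xs), ihL,
        List.map_map]
      rfl

-- the port's while loop on a Counter state appends the dictified pvExt children
lemma pvWhileExt_eq (c : List String) : ∀ (r : List String)
    (prox : List (List String × PySem.Dict String Int)),
    pvWhileExt (PySem.Dict.counter c) prox r
      = prox ++ (pvExt c r).map (fun q => (q.1, PySem.Dict.counter q.2)) := by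
  intro r
  induction r with
  | nil => intro prox; simp [pvWhileExt, pvExt]
  | cons e rest ih =>
    intro prox
    have hins : (PySem.Dict.counter c).insert e ((PySem.Dict.counter c).getD e 0 + 1)
        = PySem.Dict.counter (c ++ [e]) := by
      rw [← PySem.Dict.foldl_insert_getD_add_one_eq_counter,
        ← PySem.Dict.foldl_insert_getD_add_one_eq_counter, List.foldl_append]
      rfl
    show pvWhileExt (PySem.Dict.counter c)
        (prox ++ [(e :: rest, (PySem.Dict.counter c).insert e ((PySem.Dict.counter c).getD e 0 + 1))]) rest = _
    rw [hins, ih]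
    simp [pvExt]

-- named copies of B's outer-loop body and of the canonical accumulator, for the proofs
def pvBodyB : (PySem.Set String × List (List String × PySem.Dict String Int)) → Int →
    (PySem.Set String × List (List String × PySem.Dict String Int)) :=
  fun st _ =>
    ((st.2.foldl (fun prox p => pvWhileExt p.2 prox p.1) []).foldl (fun formulas p =>
      PySem.Set.add formulas (PySem.Str.join "" ((PySem.List.sorted p.2.keys (fun e => e)).map
        (fun e => e ++ (if p.2.getD e 0 > 1 then PySem.Int.toStr (p.2.getD e 0) else ""))))) st.1,
     st.2.foldl (fun prox p => pvWhileExt p.2 prox p.1) [])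

def pvCanon (L : List String) (b : Int) : PySem.Set String :=
  (PySem.List.pyRange 1 b).foldl (fun formulas r =>
    (pvCwr L r.toNat).foldl (fun formulas c => PySem.Set.add formulas (pvFmtB c)) formulas)
    PySem.Set.empty

lemma pvProx (L : List String) (n : Nat) :
    ((pvS L n).map (fun p => (p.1, PySem.Dict.counter p.2))).foldl
        (fun prox p => pvWhileExt p.2 prox p.1) []
      = (pvS L (n + 1)).map (fun p => (p.1, PySem.Dict.counter p.2)) := by
  rw [List.foldl_map]
  have h1 : ∀ (prox : List (List String × PySem.Dict String Int)), ∀ p ∈ pvS L n,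
      (fun prox (p : List String × List String) =>
        pvWhileExt (PySem.Dict.counter p.2) prox p.1) prox p
      = prox ++ (pvExt p.2 p.1).map (fun q => (q.1, PySem.Dict.counter q.2)) := by
    intro prox p _
    exact pvWhileExt_eq p.2 p.1 prox
  rw [PySem.List.foldl_congr_mem _ _
      (fun prox p => prox ++ (pvExt p.2 p.1).map (fun q => (q.1, PySem.Dict.counter q.2))) [] h1,
    PySem.List.foldl_append_eq_flatMap, List.nil_append, ← List.map_flatMap]
  rfl

lemma pvFmtLevel (L : List String) (n : Nat) (F : PySem.Set String) :
    ((pvS L n).map (fun p => (p.1, PySem.Dict.counter p.2))).foldl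
      (fun formulas p =>
        PySem.Set.add formulas (PySem.Str.join "" ((PySem.List.sorted p.2.keys (fun e => e)).map
          (fun e => e ++ (if p.2.getD e 0 > 1 then PySem.Int.toStr (p.2.getD e 0) else ""))))) F
    = (pvCwr L n).foldl (fun formulas c => PySem.Set.add formulas (pvFmtB c)) F := by
  rw [List.foldl_map]
  have h1 : ∀ (F : PySem.Set String), ∀ p ∈ pvS L n,
      (fun formulas (p : List String × List String) =>
        PySem.Set.add formulas (PySem.Str.join ""
          ((PySem.List.sorted (PySem.Dict.counter p.2).keys (fun e => e)).map
            (fun e => e ++ (if (PySem.Dict.counter p.2).getD e 0 > 1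
              then PySem.Int.toStr ((PySem.Dict.counter p.2).getD e 0) else ""))))) F p
      = PySem.Set.add F (pvFmtB p.2) := by
    intro F p _
    show PySem.Set.add F (pvFmtD (PySem.Dict.counter p.2)) = _
    rw [pvFmtD_counter]
  rw [PySem.List.foldl_congr_mem _ _
      (fun F (p : List String × List String) => PySem.Set.add F (pvFmtB p.2)) F h1,
    ← pvS_snd n L, List.foldl_map]

-- the invariant of B's outer loop: after n iterations the state is
-- (A's canonical accumulator for sizes 1..n, the dictified level n)
lemma pvInv (L : List String) : ∀ (n : Nat),
    (PySem.List.pyRange 0 (n : Int)).foldl pvBodyB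
      ((PySem.Set.empty : PySem.Set String), [(L, (PySem.Dict.empty : PySem.Dict String Int))])
    = (pvCanon L ((n : Int) + 1), (pvS L n).map (fun p => (p.1, PySem.Dict.counter p.2))) := by
  intro n
  induction n with
  | zero =>
    rw [Nat.cast_zero, PySem.List.pyRange_one_eq_nil (le_refl 0)]
    unfold pvCanon
    rw [PySem.List.pyRange_one_eq_nil (by norm_num)]
    rfl
  | succ n ih =>
    have hc0 : (((n : Nat) + 1 : Nat) : Int) = (n : Int) + 1 := by push_cast; ring
    rw [hc0, PySem.List.pyRange_one_succ_right (by positivity), List.foldl_append, ih]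
    simp only [List.foldl_cons, List.foldl_nil, pvBodyB]
    rw [pvProx, pvFmtLevel]
    refine Prod.ext ?_ rfl
    show _ = pvCanon L ((n : Int) + 1 + 1)
    unfold pvCanon
    rw [PySem.List.pyRange_one_succ_right (a := 1) (b := (n : Int) + 1) (by omega),
      List.foldl_append]
    simp only [List.foldl_cons, List.foldl_nil]
    rw [show ((n : Int) + 1).toNat = n + 1 from by omega]

lemma pvAeq (elementos : List String) (max_combinacoes : Int) :
    gerar_formulas elementos max_combinacoes
      = pvCanon (PySem.List.dedup elementos) (max_combinacoes + 1) := by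
  unfold gerar_formulas pvCanon
  apply PySem.List.foldl_congr_mem
  intro acc r _
  exact pvStep elementos r.toNat acc

lemma pvBeq (elementos : List String) (max_combinacoes : Int) :
    gerar_formulas_alt elementos max_combinacoes
      = pvCanon (PySem.List.dedup elementos) (max_combinacoes + 1) := by
  have hB : gerar_formulas_alt elementos max_combinacoes
      = ((PySem.List.pyRange 0 max_combinacoes).foldl pvBodyB
        ((PySem.Set.empty : PySem.Set String),
          [(PySem.List.dedup elementos, (PySem.Dict.empty : PySem.Dict String Int))])).1 := rfl
  by_cases hm : max_combinacoes ≤ 0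
  · rw [hB, PySem.List.pyRange_one_eq_nil hm]
    unfold pvCanon
    rw [PySem.List.pyRange_one_eq_nil (by omega)]
    rfl
  · have h0 : (max_combinacoes.toNat : Int) = max_combinacoes := Int.toNat_of_nonneg (by omega)
    rw [hB, ← h0, pvInv]

-- ===== VERDICT (by name: the statement is the Claim_ definition above) =====
theorem gerar_formulas_spec : Claim_equal_gerar_formulas := by
  intro elementos max_combinacoes _
  unfold Spec_gerar_formulas
  rw [pvAeq, pvBeq]
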